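-- pv_equiv track=rewrite | github.com/one-tenth-fps/rzdb-etran | utils.py | get_code6
-- ===== SOURCE A (Python) =====
-- def get_code6(val: int) -> str:
--     s = 0
--     n = val
--     for i in range(5, 0, -1):
--         s += n % 10 * i
--         n //= 10
--     digit = s % 11
--     if digit == 10:
--         s = 0
--         n = val
--         for i in range(7, 2, -1):
--             s += n % 10 * i
--             n //= 10
--         digit = s % 11
--         if digit == 10:
--             digit = 0
--     n = val * 10 + digit
--     return f"{n:06d}"
-- ===== SOURCE B (Python) =====
-- def get_code6(val: int) -> str:
--     # One pass extracts the five low digits once, accumulating both the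
--     # weighted sum s (weights 5..1) and the plain digit sum d; the second
--     # weighting (7..3) is s + 2*d, so no second digit loop is needed.
--     s = 0
--     d = 0
--     n = val
--     for w in range(5, 0, -1):
--         dig = n % 10
--         s += dig * w
--         d += dig
--         n //= 10
--     digit = s % 11
--     if digit == 10:
--         digit = (s + 2 * d) % 11
--         if digit == 10:
--             digit = 0
--     return f"{val * 10 + digit:06d}"
-- ===== Notes on version B (the rewrite author's own statement) =====
-- stated objective: alternative
-- what changed: A single mod/div pass extracts the five low digits once, accumulating both the weighted sum and the plain digit sum, and derives A's second weighted sum algebraically (each second-stage weight exceeds the first by two), so A's second digit-extraction loop disappears.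
import Mathlib
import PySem

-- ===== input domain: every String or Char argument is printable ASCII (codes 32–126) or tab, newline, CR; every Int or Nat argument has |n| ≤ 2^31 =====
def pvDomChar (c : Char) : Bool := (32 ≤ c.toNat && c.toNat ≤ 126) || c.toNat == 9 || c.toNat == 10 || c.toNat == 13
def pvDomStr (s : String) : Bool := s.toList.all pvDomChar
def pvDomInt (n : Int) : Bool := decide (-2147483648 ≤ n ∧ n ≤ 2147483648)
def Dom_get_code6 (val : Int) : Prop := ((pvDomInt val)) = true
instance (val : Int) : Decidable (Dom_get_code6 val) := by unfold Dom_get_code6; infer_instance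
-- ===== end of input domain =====

-- B removes A's second digit-extraction loop: one pass also keeps the plain digit
-- sum, from which the second weighted sum follows algebraically (alternative decomposition).


-- Hand port of Python's f"{n:06d}" (zero-pad to width 6, sign counts toward the
-- width); exact for every Int.  Shared by both ports: both Pythons end with the
-- identical f-string.
def pyFormat06 (n : Int) : String :=
  if n < 0 then
    let s := (PySem.Int.toStr (-n)).toList
    String.mk ('-' :: (List.replicate (5 - s.length) '0' ++ s))
  else
    let s := (PySem.Int.toStr n).toList
    String.mk (List.replicate (6 - s.length) '0' ++ s)

-- ===== PORT A =====
def get_code6 (val : Int) : String :=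
  let p := (PySem.List.pyRange 5 0 (-1)).foldl
    (fun (p : Int × Int) i => (p.1 + PySem.Int.mod p.2 10 * i, PySem.Int.floordiv p.2 10))
    (0, val)
  let digit := PySem.Int.mod p.1 11
  let digit :=
    if digit == 10 then
      let q := (PySem.List.pyRange 7 2 (-1)).foldl
        (fun (q : Int × Int) i => (q.1 + PySem.Int.mod q.2 10 * i, PySem.Int.floordiv q.2 10))
        (0, val)
      let digit2 := PySem.Int.mod q.1 11
      if digit2 == 10 then 0 else digit2
    else digit
  pyFormat06 (val * 10 + digit)

-- ===== PORT B =====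
def get_code6_alt (val : Int) : String :=
  let t := (PySem.List.pyRange 5 0 (-1)).foldl
    (fun (t : Int × Int × Int) w =>
      let dig := PySem.Int.mod t.2.2 10
      (t.1 + dig * w, t.2.1 + dig, PySem.Int.floordiv t.2.2 10))
    (0, 0, val)
  let digit := PySem.Int.mod t.1 11
  let digit :=
    if digit == 10 then
      let digit2 := PySem.Int.mod (t.1 + 2 * t.2.1) 11
      if digit2 == 10 then 0 else digit2
    else digit
  pyFormat06 (val * 10 + digit)

-- ===== PRECONDITION & SPEC =====
def Spec_get_code6 (val : Int) (out : String) : Prop := out = get_code6_alt val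
instance (val : Int) (out : String) : Decidable (Spec_get_code6 val out) := by unfold Spec_get_code6; infer_instance

-- ===== CLAIM (what is proved, stated in full; the proofs are below) =====
def Claim_equal_get_code6 : Prop := ∀ (val : Int), Dom_get_code6 val → Spec_get_code6 val (get_code6 val)

-- ===== LEMMAS AND PROOFS =====

-- ===== VERDICT (by name: the statement is the Claim_ definition above) =====
theorem get_code6_spec : Claim_equal_get_code6 := by
  intro val _
  unfold Spec_get_code6 get_code6 get_code6_alt
  have h5 : PySem.List.pyRange 5 0 (-1) = [5, 4, 3, 2, 1] := by decide
  have h7 : PySem.List.pyRange 7 2 (-1) = [7, 6, 5, 4, 3] := by decide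
  simp only [h5, h7, List.foldl]
  generalize PySem.Int.mod val 10 = a
  generalize PySem.Int.mod (PySem.Int.floordiv val 10) 10 = b
  generalize PySem.Int.mod (PySem.Int.floordiv (PySem.Int.floordiv val 10) 10) 10 = c
  generalize PySem.Int.mod (PySem.Int.floordiv (PySem.Int.floordiv (PySem.Int.floordiv val 10) 10) 10) 10 = d
  generalize PySem.Int.mod (PySem.Int.floordiv (PySem.Int.floordiv (PySem.Int.floordiv (PySem.Int.floordiv val 10) 10) 10) 10) 10 = e
  have key : (0 + a * 7 + b * 6 + c * 5 + d * 4 + e * 3 : Int)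
      = (0 + a * 5 + b * 4 + c * 3 + d * 2 + e * 1) + 2 * (0 + a + b + c + d + e) := by ring
  rw [key]
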